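-- pv_equiv track=rewrite | github.com/netvega/Tools | plot_multichannel.py | diffdiff
-- ===== SOURCE A (Python) =====
-- def diffdiff(data):
--     lastdiff1 = data[1] - data[0]
--     filtered = [0, lastdiff1]
--     for i in range(2, len(data)):
--         diff1 = data[i] - data[i-1]
--         diff2 = diff1 - lastdiff1
--         filtered.append(diff2)
--         lastdiff1 = diff1
--     return filtered
-- ===== SOURCE B (Python) =====
-- def diffdiff(data):
--     diffs = [data[i] - data[i-1] for i in range(1, len(data))]
--     result = [0, diffs[0]]
--     for j in range(1, len(diffs)):
--         result.append(diffs[j] - diffs[j-1])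
--     return result
-- ===== Notes on version B (the rewrite author's own statement) =====
-- stated objective: alternative
-- what changed: Replaces A's single incremental pass with a lastdiff1 accumulator by two passes: first materialise the full first-differences list, then difference that table; len<2 inputs (where both raise IndexError) are excluded by Pre_.
import Mathlib
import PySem

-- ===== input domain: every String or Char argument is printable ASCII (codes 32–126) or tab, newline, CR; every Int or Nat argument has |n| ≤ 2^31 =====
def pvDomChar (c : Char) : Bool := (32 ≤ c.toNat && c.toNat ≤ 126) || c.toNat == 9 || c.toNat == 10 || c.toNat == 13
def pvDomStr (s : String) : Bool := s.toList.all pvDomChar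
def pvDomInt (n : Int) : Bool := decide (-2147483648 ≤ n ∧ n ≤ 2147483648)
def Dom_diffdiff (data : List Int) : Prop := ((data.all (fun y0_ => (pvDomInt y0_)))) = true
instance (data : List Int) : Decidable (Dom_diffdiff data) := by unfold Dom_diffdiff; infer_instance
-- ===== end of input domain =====

-- B builds an explicit first-differences table and differences it in a second pass,
-- replacing A's single pass with a lastdiff1 accumulator (alternative decomposition, same cost).

-- ===== PORT A =====
def diffdiff (data : List Int) : List Int :=
  let lastdiff1 := PySem.List.pyGetD data 1 0 - PySem.List.pyGetD data 0 0
  let st := (PySem.List.pyRange 2 (PySem.List.len data) 1).foldl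
    (fun (st : Int × List Int) i =>
      let diff1 := PySem.List.pyGetD data i 0 - PySem.List.pyGetD data (i - 1) 0
      let diff2 := diff1 - st.1
      (diff1, st.2 ++ [diff2]))
    (lastdiff1, [0, lastdiff1])
  st.2

-- ===== PORT B =====
def diffdiff_alt (data : List Int) : List Int :=
  let diffs := (PySem.List.pyRange 1 (PySem.List.len data) 1).map
    (fun i => PySem.List.pyGetD data i 0 - PySem.List.pyGetD data (i - 1) 0)
  (PySem.List.pyRange 1 (PySem.List.len diffs) 1).foldl
    (fun result j =>
      result ++ [PySem.List.pyGetD diffs j 0 - PySem.List.pyGetD diffs (j - 1) 0])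
    [0, PySem.List.pyGetD diffs 0 0]

-- ===== PRECONDITION & SPEC =====
-- Pre_ excludes lists of fewer than 2 elements, on which A (data[1]) and B (diffs[0]) both raise IndexError.
def Pre_diffdiff (data : List Int) : Prop := 2 ≤ data.length
instance (data : List Int) : Decidable (Pre_diffdiff data) := by unfold Pre_diffdiff; infer_instance
def pvWitness_diffdiff : List Int := [3, 1, 4, 1]

def Spec_diffdiff (data : List Int) (out : List Int) : Prop := out = diffdiff_alt data
instance (data : List Int) (out : List Int) : Decidable (Spec_diffdiff data out) := by unfold Spec_diffdiff; infer_instance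

-- ===== CLAIM (what is proved, stated in full; the proofs are below) =====
def Claim_equal_diffdiff : Prop := ∀ (data : List Int), Dom_diffdiff data → Pre_diffdiff data → Spec_diffdiff data (diffdiff data)

-- ===== LEMMAS AND PROOFS =====

theorem pyRange_one_map (a : Int) (m : Nat) :
    PySem.List.pyRange a (a + (m : Int)) 1 = (List.range m).map (fun (k : Nat) => a + (k : Int)) := by
  induction m with
  | zero => simp [PySem.List.pyRange]
  | succ m ih =>
      rw [show a + ((m + 1 : Nat) : Int) = (a + (m : Int)) + 1 by push_cast; ring,
        PySem.List.pyRange_one_succ_right (by omega), ih, List.range_succ]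
      simp

-- A's loop over indices 2..(2+m): state after the loop in closed form.
theorem loopA (F : Int → Int) (acc0 : List Int) (m : Nat) :
    (PySem.List.pyRange 2 (2 + (m : Int)) 1).foldl
      (fun (st : Int × List Int) i => (F i, st.2 ++ [F i - st.1])) (F 1, acc0)
    = (F ((m : Int) + 1),
       acc0 ++ (List.range m).map (fun (k : Nat) => F ((k : Int) + 2) - F ((k : Int) + 1))) := by
  induction m with
  | zero => simp [PySem.List.pyRange]
  | succ m ih =>
      rw [show (2 : Int) + ((m + 1 : Nat) : Int) = (2 + (m : Int)) + 1 by push_cast; ring,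
        PySem.List.pyRange_one_succ_right (by omega), List.foldl_append, ih]
      simp only [List.foldl_cons, List.foldl_nil, Prod.mk.injEq]
      refine ⟨by congr 1; push_cast; ring, ?_⟩
      rw [List.range_succ, List.map_append, show (2 : Int) + (m : Int) = (m : Int) + 2 by ring]
      simp

theorem diffdiff_spec : Claim_equal_diffdiff := by
  intro data _ hpre
  unfold Spec_diffdiff diffdiff diffdiff_alt Pre_diffdiff at *
  set F : Int → Int := fun i => PySem.List.pyGetD data i 0 - PySem.List.pyGetD data (i - 1) 0 with hF
  obtain ⟨n, hn⟩ : ∃ n : Nat, data.length = n + 2 := ⟨data.length - 2, by omega⟩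
  have hlen : PySem.List.len data = 2 + (n : Int) := by
    simp [PySem.List.len_eq, hn]; ring
  simp only [hlen]
  have h01 : F 1 = PySem.List.pyGetD data 1 0 - PySem.List.pyGetD data 0 0 := by
    rw [hF]; norm_num
  rw [← h01, loopA F [0, F 1] n]
  -- B's side
  set diffs := List.map F (PySem.List.pyRange 1 (2 + (n : Int)) 1) with hd
  have hdiffs : diffs = (List.range (n + 1)).map (fun (k : Nat) => F (1 + (k : Int))) := by
    rw [hd, show (2 : Int) + (n : Int) = 1 + ((n + 1 : Nat) : Int) by push_cast; ring,
      pyRange_one_map, List.map_map]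
    rfl
  have hdlen : PySem.List.len diffs = 1 + ((n : Nat) : Int) := by
    simp [PySem.List.len_eq, hdiffs]; omega
  have hget : ∀ k : Nat, k < n + 1 → PySem.List.pyGetD diffs (k : Int) 0 = F (1 + (k : Int)) := by
    intro k hk
    rw [hdiffs, PySem.List.pyGetD_natCast,
      PySem.List.getD_map_range (fun (k : Nat) => F (1 + (k : Int))) (n + 1) k 0 hk]
  have hget0 : PySem.List.pyGetD diffs 0 0 = F 1 := by
    have := hget 0 (by omega)
    norm_num at this
    simpa using this
  rw [hdlen, pyRange_one_map, List.foldl_map, PySem.List.foldl_append_singleton_eq_map, hget0]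
  dsimp only
  congr 1
  apply List.map_congr_left
  intro k hk
  have hk' : k < n := List.mem_range.mp hk
  rw [show (1 : Int) + (k : Int) - 1 = ((k : Nat) : Int) by ring,
    show (1 : Int) + (k : Int) = ((k + 1 : Nat) : Int) by push_cast; ring,
    hget (k + 1) (by omega), hget k (by omega),
    show (1 : Int) + ((k + 1 : Nat) : Int) = (k : Int) + 2 by push_cast; ring,
    show (1 : Int) + (k : Int) = (k : Int) + 1 by ring]
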